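-- pv_equiv track=rewrite | github.com/wilmurillo-ai/Design-Assistant | .skills/openclaw-skills/skills/michaeljochen/itsm-ticket-analyzer/scripts/analyze_ticket.py | count_similar_tickets
-- ===== SOURCE A (Python) =====
-- def count_similar_tickets(ticket, all_tickets, limit=10):
--     """计算相似工单数量"""
--     service_type = ticket.get('service_type', '')
--     service = ticket.get('service', '')
--
--     if not service_type and not service:
--         return 0
--
--     count = 0
--     for t in all_tickets:
--         if t.get('ticket_id') == ticket.get('ticket_id'):
--             continue
--         if service_type and t.get('service_type') == service_type:
--             count += 1
--         elif service and t.get('service') == service: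
--             count += 1
--         if count >= limit:
--             break
--
--     return count
-- ===== SOURCE B (Python) =====
-- def count_similar_tickets(ticket, all_tickets, limit=10):
--     """计算相似工单数量"""
--     service_type = ticket.get('service_type', '')
--     service = ticket.get('service', '')
--
--     if not service_type and not service:
--         return 0
--
--     tid = ticket.get('ticket_id')
--     others = [t for t in all_tickets if t.get('ticket_id') != tid]
--
--     # staged passes: project each field, count occurrences, combine by inclusion-exclusion
--     a = [t.get('service_type') for t in others].count(service_type) if service_type else 0
--     b = [t.get('service') for t in others].count(service) if service else 0
--     c = ([(t.get('service_type'), t.get('service')) for t in others]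
--          .count((service_type, service)) if service_type and service else 0)
--
--     matches = a + b - c
--     return max(0, min(matches, limit))
-- ===== Notes on version B (the rewrite author's own statement) =====
-- stated objective: alternative
-- what changed: Replaces A's stateful break-early loop over tickets by staged passes: filter out the self ticket, project each field into a list, count occurrences of the ticket's own field values, and combine the two field counts by inclusion-exclusion (a + b - pair count) before clamping the total to [0, limit]; no per-ticket if/elif test remains.
-- intended difference: When limit <= 0 (and the ticket has a service_type or service) and the first non-self ticket matches, A returns 1 - leftover loop state from breaking only after the first increment - while B returns 0, the intended value since at most limit (i.e. zero) similar tickets should be reported. — e.g. on count_similar_tickets([("ticket_id", "1"), ("service", "a")], [[("ticket_id", "2"), ("service", "a")]], 0): A returns 1, B returns 0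
import Mathlib
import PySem

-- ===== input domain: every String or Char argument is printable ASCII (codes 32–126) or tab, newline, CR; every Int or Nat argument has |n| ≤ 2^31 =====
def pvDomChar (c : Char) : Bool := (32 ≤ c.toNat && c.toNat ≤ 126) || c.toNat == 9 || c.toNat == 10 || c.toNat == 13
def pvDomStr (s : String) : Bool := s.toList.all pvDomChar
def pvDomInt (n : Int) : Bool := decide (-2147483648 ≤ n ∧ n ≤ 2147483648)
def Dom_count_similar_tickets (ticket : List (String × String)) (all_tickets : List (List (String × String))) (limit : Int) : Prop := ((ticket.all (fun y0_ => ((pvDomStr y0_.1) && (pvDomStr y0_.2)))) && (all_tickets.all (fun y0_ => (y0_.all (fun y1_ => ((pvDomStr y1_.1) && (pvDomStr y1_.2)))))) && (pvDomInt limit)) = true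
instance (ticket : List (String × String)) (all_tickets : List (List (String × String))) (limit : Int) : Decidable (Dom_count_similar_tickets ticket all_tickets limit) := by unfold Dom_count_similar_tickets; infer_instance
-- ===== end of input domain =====

-- B replaces A's stateful break-early loop by staged passes (filter out self, project each field,
-- count occurrences, combine by inclusion-exclusion) clamped to [0, limit]; for limit ≤ 0 A can
-- return leftover loop state 1 (see D_ below) while B returns the intended 0.

-- dict.get k  on an association list: value of the first pair whose key is k (None if absent)
def pvGet (d : List (String × String)) (k : String) : Option String :=
  (d.find? (fun p => p.1 == k)).map (·.2)

-- dict.get k dflt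
def pvGetD (d : List (String × String)) (k : String) (dflt : String) : String :=
  (pvGet d k).getD dflt

-- ===== PORT A =====
-- the for-loop with continue/break, carrying the running count
def countLoopA (myId : Option String) (st s : String) (limit : Int) :
    List (List (String × String)) → Int → Int
  | [], count => count
  | t :: rest, count =>
    if pvGet t "ticket_id" == myId then
      countLoopA myId st s limit rest count
    else
      let count :=
        if st ≠ "" && pvGet t "service_type" == some st then count + 1
        else if s ≠ "" && pvGet t "service" == some s then count + 1
        else count
      if count ≥ limit then count else countLoopA myId st s limit rest count

def count_similar_tickets (ticket : List (String × String)) (all_tickets : List (List (String × String))) (limit : Int) : Int :=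
  let service_type := pvGetD ticket "service_type" ""
  let service := pvGetD ticket "service" ""
  if service_type = "" ∧ service = "" then 0
  else countLoopA (pvGet ticket "ticket_id") service_type service limit all_tickets 0

-- ===== PORT B =====
def count_similar_tickets_alt (ticket : List (String × String)) (all_tickets : List (List (String × String))) (limit : Int) : Int :=
  let service_type := pvGetD ticket "service_type" ""
  let service := pvGetD ticket "service" ""
  if service_type = "" ∧ service = "" then 0
  else
    let tid := pvGet ticket "ticket_id"
    let others := all_tickets.filter (fun t => pvGet t "ticket_id" != tid)
    let a : Int :=
      if service_type ≠ "" then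
        ((others.map (fun t => pvGet t "service_type")).count (some service_type) : Nat) else 0
    let b : Int :=
      if service ≠ "" then
        ((others.map (fun t => pvGet t "service")).count (some service) : Nat) else 0
    let c : Int :=
      if service_type ≠ "" ∧ service ≠ "" then
        ((others.map (fun t => (pvGet t "service_type", pvGet t "service"))).count
          (some service_type, some service) : Nat) else 0
    max 0 (min (a + b - c) limit)

-- ===== PRECONDITION & SPEC =====
-- For limit ≤ 0 with a matching first non-self ticket, A returns 1 (leftover loop state from the
-- post-increment break) while B returns 0, the intended value: at most limit similar tickets.
def D_count_similar_tickets (ticket : List (String × String)) (all_tickets : List (List (String × String))) (limit : Int) : Prop :=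
  limit ≤ 0 ∧
  ((all_tickets.find? (fun t => t.lookup "ticket_id" != ticket.lookup "ticket_id")).any (fun t =>
      ["service_type", "service"].any (fun k =>
        (ticket.lookup k).getD "" ≠ "" && (t.lookup k).getD "" == (ticket.lookup k).getD "")) = true)
instance (ticket : List (String × String)) (all_tickets : List (List (String × String))) (limit : Int) : Decidable (D_count_similar_tickets ticket all_tickets limit) := by unfold D_count_similar_tickets; infer_instance

def Spec_count_similar_tickets (ticket : List (String × String)) (all_tickets : List (List (String × String))) (limit : Int) (out : Int) : Prop := ¬ D_count_similar_tickets ticket all_tickets limit → out = count_similar_tickets_alt ticket all_tickets limit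
instance (ticket : List (String × String)) (all_tickets : List (List (String × String))) (limit : Int) (out : Int) : Decidable (Spec_count_similar_tickets ticket all_tickets limit out) := by unfold Spec_count_similar_tickets; infer_instance

def pvDiffWitness_count_similar_tickets : (List (String × String)) × (List (List (String × String))) × Int :=
  ([("ticket_id", "1"), ("service", "a")], [[("ticket_id", "2"), ("service", "a")]], 0)
def pvDiffWitnessOut_count_similar_tickets : Int × Int := (1, 0)

-- ===== CLAIM (what is proved, stated in full; the proofs are below) =====
def Claim_unchanged_count_similar_tickets : Prop := ∀ (ticket : List (String × String)) (all_tickets : List (List (String × String))) (limit : Int), Dom_count_similar_tickets ticket all_tickets limit → Spec_count_similar_tickets ticket all_tickets limit (count_similar_tickets ticket all_tickets limit)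
def Claim_changed_count_similar_tickets : Prop := Dom_count_similar_tickets (pvDiffWitness_count_similar_tickets.1) (pvDiffWitness_count_similar_tickets.2.1) (pvDiffWitness_count_similar_tickets.2.2) ∧ D_count_similar_tickets (pvDiffWitness_count_similar_tickets.1) (pvDiffWitness_count_similar_tickets.2.1) (pvDiffWitness_count_similar_tickets.2.2) ∧ count_similar_tickets (pvDiffWitness_count_similar_tickets.1) (pvDiffWitness_count_similar_tickets.2.1) (pvDiffWitness_count_similar_tickets.2.2) = pvDiffWitnessOut_count_similar_tickets.1 ∧ count_similar_tickets_alt (pvDiffWitness_count_similar_tickets.1) (pvDiffWitness_count_similar_tickets.2.1) (pvDiffWitness_count_similar_tickets.2.2) = pvDiffWitnessOut_count_similar_tickets.2 ∧ pvDiffWitnessOut_count_similar_tickets.1 ≠ pvDiffWitnessOut_count_similar_tickets.2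
def Claim_exact_count_similar_tickets : Prop := ∀ (ticket : List (String × String)) (all_tickets : List (List (String × String))) (limit : Int), Dom_count_similar_tickets ticket all_tickets limit → D_count_similar_tickets ticket all_tickets limit → count_similar_tickets ticket all_tickets limit ≠ count_similar_tickets_alt ticket all_tickets limit

-- ===== LEMMAS AND PROOFS =====

-- the per-ticket predicate A effectively counts with (including the non-self test)
def pvPred (myId : Option String) (st s : String) (t : List (String × String)) : Bool :=
  pvGet t "ticket_id" != myId &&
  ((st ≠ "" && pvGet t "service_type" == some st) || (s ≠ "" && pvGet t "service" == some s))

theorem countLoopA_cons (myId : Option String) (st s : String) (limit : Int)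
    (t : List (String × String)) (rest : List (List (String × String))) (count : Int) :
    countLoopA myId st s limit (t :: rest) count
      = if (pvGet t "ticket_id" == myId) = true then countLoopA myId st s limit rest count
        else
          (if (pvPred myId st s t = true) then
            (if count + 1 ≥ limit then count + 1 else countLoopA myId st s limit rest (count + 1))
          else
            (if count ≥ limit then count else countLoopA myId st s limit rest count)) := by
  by_cases hskip : (pvGet t "ticket_id" == myId) = true
  · simp [countLoopA, hskip]
  · have hp : pvPred myId st s t
        = ((st ≠ "" && pvGet t "service_type" == some st) ||
           (s ≠ "" && pvGet t "service" == some s)) := by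
      simp [pvPred, bne, hskip]
    simp only [countLoopA, hskip, if_false, hp]
    split_ifs <;> simp_all <;> tauto

theorem countLoopA_pos (myId : Option String) (st s : String) (limit : Int)
    (l : List (List (String × String))) (count : Int) (hc : count < limit) :
    countLoopA myId st s limit l count
      = min (count + (l.countP (pvPred myId st s) : Nat)) limit := by
  induction l generalizing count with
  | nil => simp [countLoopA]; omega
  | cons t rest ih =>
    rw [countLoopA_cons]
    by_cases hskip : (pvGet t "ticket_id" == myId) = true
    · have hp : pvPred myId st s t = false := by
        simp only [pvPred, Bool.and_eq_false_iff, bne_eq_false_iff_eq]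
        left; simpa using hskip
      simp [hskip, ih count hc, List.countP_cons, hp]
    · simp only [hskip, if_false]
      by_cases hm : pvPred myId st s t = true
      · simp only [hm, if_true, List.countP_cons]
        by_cases hbrk : count + 1 ≥ limit
        · have hr : ((rest.countP (pvPred myId st s) : Nat) : Int) ≥ 0 := by positivity
          simp only [ge_iff_le, show limit ≤ count + 1 from hbrk, if_true, hm]
          simp; omega
        · push_neg at hbrk
          have h2 : ¬ (limit ≤ count + 1) := by omega
          simp only [ge_iff_le, h2, if_false, ih (count + 1) hbrk, hm]
          simp; omega
      · simp only [Bool.not_eq_true] at hm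
        have h2 : ¬ (limit ≤ count) := by omega
        simp only [ge_iff_le, h2, if_false, ih count hc, List.countP_cons, hm]
        simp

theorem countLoopA_nonpos (myId : Option String) (st s : String) (limit : Int)
    (l : List (List (String × String))) (hl : limit ≤ 0) :
    countLoopA myId st s limit l 0
      = match l.find? (fun t => pvGet t "ticket_id" != myId) with
        | some t => if pvPred myId st s t = true then (1 : Int) else 0
        | none => 0 := by
  induction l with
  | nil => simp [countLoopA]
  | cons t rest ih =>
    rw [countLoopA_cons]
    by_cases hskip : (pvGet t "ticket_id" == myId) = true
    · have hne : (pvGet t "ticket_id" != myId) = false := by simp [bne, hskip]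
      simp only [hskip, if_true, List.find?_cons, hne]
      exact ih
    · have hne : (pvGet t "ticket_id" != myId) = true := by simp [bne, hskip]
      simp only [hskip, if_false, List.find?_cons, hne]
      by_cases hm : pvPred myId st s t = true
      · have h1 : (0 : Int) + 1 ≥ limit := by omega
        simp [hm, h1]
        exact fun h => absurd h (by omega)
      · have h0 : (0 : Int) ≥ limit := by omega
        simp [hm, h0]

-- first-match lookup on an association list is Python's dict.get
theorem lookup_eq_pvGet (d : List (String × String)) (k : String) : d.lookup k = pvGet d k := by
  induction d with
  | nil => rfl
  | cons p rest ih =>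
    cases p with
    | mk a b =>
      by_cases h : a = k
      · simp [List.lookup, pvGet, List.find?, h]
      · have h1 : (k == a) = false := by simp [Ne.symm h]
        have h2 : (a == k) = false := by simp [h]
        simp only [List.lookup, pvGet, List.find?, h1, h2] at *
        simpa using ih

theorem getD_fold (d : List (String × String)) (k : String) : (pvGet d k).getD "" = pvGetD d k "" := rfl

-- matching on defaulted strings is matching the option against the non-empty default
theorem key_eq (u ticket : List (String × String)) (k : String) :
    (pvGetD ticket k "" ≠ "" && pvGetD u k "" == pvGetD ticket k "")
      = (pvGetD ticket k "" ≠ "" && pvGet u k == some (pvGetD ticket k "")) := by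
  by_cases h : pvGetD ticket k "" = ""
  · simp [h]
  · unfold pvGetD at *
    cases hx : pvGet u k <;> simp_all

-- inclusion-exclusion for boolean counts, in Int
theorem countP_or_int {α : Type} (p q : α → Bool) (l : List α) :
    ((l.countP fun x => p x || q x : Nat) : Int)
      = ((l.countP p : Nat) : Int) + ((l.countP q : Nat) : Int)
        - ((l.countP fun x => p x && q x : Nat) : Int) := by
  induction l with
  | nil => simp
  | cons x rest ih =>
    simp only [List.countP_cons]
    cases hp : p x <;> cases hq : q x <;> simp [hp, hq] <;> push_cast <;> omega

-- countP respects pointwise equality of predicates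
theorem countP_funext {α : Type} (p q : α → Bool) (l : List α) (h : ∀ t, p t = q t) :
    l.countP p = l.countP q := by
  rw [show p = q from funext h]

-- B's staged projected counts combined by inclusion-exclusion count exactly A's predicate
theorem alt_matches_eq (myId : Option String) (st s : String)
    (l : List (List (String × String))) :
    (if st ≠ "" then
        (((l.filter (fun t => pvGet t "ticket_id" != myId)).map
            (fun t => pvGet t "service_type")).count (some st) : Int) else 0)
    + (if s ≠ "" then
        (((l.filter (fun t => pvGet t "ticket_id" != myId)).map
            (fun t => pvGet t "service")).count (some s) : Int) else 0)
    - (if st ≠ "" ∧ s ≠ "" then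
        (((l.filter (fun t => pvGet t "ticket_id" != myId)).map
            (fun t => (pvGet t "service_type", pvGet t "service"))).count
          (some st, some s) : Int) else 0)
      = ((l.countP (pvPred myId st s) : Nat) : Int) := by
  set others := l.filter (fun t => pvGet t "ticket_id" != myId) with hothers
  -- each count over a map is a countP over others
  have ha : ((others.map (fun t => pvGet t "service_type")).count (some st))
      = others.countP (fun t => pvGet t "service_type" == some st) := by
    simp [List.count, List.countP_map, Function.comp_def]
  have hb : ((others.map (fun t => pvGet t "service")).count (some s))
      = others.countP (fun t => pvGet t "service" == some s) := by
    simp [List.count, List.countP_map, Function.comp_def]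
  have hc : ((others.map (fun t => (pvGet t "service_type", pvGet t "service"))).count
        (some st, some s))
      = others.countP (fun t => pvGet t "service_type" == some st && pvGet t "service" == some s) := by
    simp only [List.count, List.countP_map]
    refine countP_funext _ _ _ (fun t => ?_)
    show ((pvGet t "service_type", pvGet t "service") == (some st, some s))
        = (pvGet t "service_type" == some st && pvGet t "service" == some s)
    rcases h1 : pvGet t "service_type" == some st <;> rcases h2 : pvGet t "service" == some s <;>
      simp_all [Prod.ext_iff]
  -- countP over others becomes countP with the non-self conjunct over l
  have hfil : ∀ (r : List (String × String) → Bool),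
      others.countP r = l.countP (fun t => (pvGet t "ticket_id" != myId) && r t) := by
    intro r
    rw [hothers, List.countP_filter]
    exact countP_funext _ _ _ (fun t => by rcases h : r t <;> simp [h, Bool.and_comm])
  by_cases hst : st = "" <;> by_cases hs : s = ""
  · have : ∀ t, pvPred myId "" "" t = false := by intro t; simp [pvPred]
    simp [hst, hs, countP_funext _ _ l this]
  · -- st = "", s ≠ ""
    have hpe : ∀ t, pvPred myId "" s t
        = ((pvGet t "ticket_id" != myId) && (pvGet t "service" == some s)) := by
      intro t; simp [pvPred, hs]
    simp [hst, hs, hb, hfil, countP_funext _ _ l hpe]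
  · have hpe : ∀ t, pvPred myId st "" t
        = ((pvGet t "ticket_id" != myId) && (pvGet t "service_type" == some st)) := by
      intro t; simp [pvPred, hst]
    simp [hst, hs, ha, hfil, countP_funext _ _ l hpe]
  · -- both nonempty: inclusion-exclusion
    simp only [ne_eq, hst, hs, not_false_eq_true, if_true, and_self, ha, hb, hc, hfil]
    have hor := countP_or_int
      (fun t : List (String × String) => (pvGet t "ticket_id" != myId) && (pvGet t "service_type" == some st))
      (fun t : List (String × String) => (pvGet t "ticket_id" != myId) && (pvGet t "service" == some s)) l
    have h1 : ∀ t : List (String × String),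
        (((pvGet t "ticket_id" != myId) && (pvGet t "service_type" == some st)) ||
         ((pvGet t "ticket_id" != myId) && (pvGet t "service" == some s)))
          = pvPred myId st s t := by
      intro t; simp [pvPred, hst, hs, Bool.and_or_distrib_left]
    have h2 : ∀ t : List (String × String),
        (((pvGet t "ticket_id" != myId) && (pvGet t "service_type" == some st)) &&
         ((pvGet t "ticket_id" != myId) && (pvGet t "service" == some s)))
          = ((pvGet t "ticket_id" != myId) && (pvGet t "service_type" == some st && pvGet t "service" == some s)) := by
      intro t
      rcases hx : pvGet t "ticket_id" != myId <;>
        rcases hy : pvGet t "service_type" == some st <;> simp_all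
    rw [countP_funext _ _ l h1, countP_funext _ _ l h2] at hor
    omega

-- B's result, re-expressed through pvPred (bridging lemma used by both verdict proofs)
theorem alt_eq (ticket : List (String × String)) (all_tickets : List (List (String × String))) (limit : Int) :
    count_similar_tickets_alt ticket all_tickets limit
      = if pvGetD ticket "service_type" "" = "" ∧ pvGetD ticket "service" "" = "" then 0
        else max 0 (min ((all_tickets.countP
              (pvPred (pvGet ticket "ticket_id") (pvGetD ticket "service_type" "") (pvGetD ticket "service" "")) : Nat) : Int) limit) := by
  unfold count_similar_tickets_alt
  by_cases h0 : pvGetD ticket "service_type" "" = "" ∧ pvGetD ticket "service" "" = ""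
  · simp [h0]
  · simp only [h0, if_false]
    rw [alt_matches_eq]

-- ===== VERDICT (by name: the statement is the Claim_ definition above) =====
theorem count_similar_tickets_spec : Claim_unchanged_count_similar_tickets := by
  intro ticket all_tickets limit _ hnd
  unfold count_similar_tickets
  rw [alt_eq]
  set st := pvGetD ticket "service_type" "" with hst
  set s := pvGetD ticket "service" "" with hs
  by_cases h0 : st = "" ∧ s = ""
  · simp [h0]
  · simp only [h0, if_false]
    set myId := pvGet ticket "ticket_id" with hmy
    have hpos : ((all_tickets.countP (pvPred myId st s) : Nat) : Int) ≥ 0 := by positivity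
    by_cases hl : 0 < limit
    · rw [countLoopA_pos myId st s limit all_tickets 0 hl]
      omega
    · push_neg at hl
      rw [countLoopA_nonpos myId st s limit all_tickets hl]
      have hB : max 0 (min ((all_tickets.countP (pvPred myId st s) : Nat) : Int) limit) = 0 := by
        omega
      rw [hB]
      simp only [D_count_similar_tickets] at hnd
      push_neg at hnd
      have hnm := hnd hl
      rw [ne_eq, Bool.not_eq_true] at hnm
      simp only [List.any_cons, List.any_nil, Bool.or_false, lookup_eq_pvGet, getD_fold,
        key_eq, ← hst, ← hs, ← hmy] at hnm
      cases hfind : all_tickets.find? (fun t => pvGet t "ticket_id" != myId) with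
      | none => simp
      | some t =>
        rw [hfind] at hnm
        simp only [Option.any_some] at hnm
        have hself : (pvGet t "ticket_id" != myId) = true := by
          have := List.find?_some hfind; simpa using this
        have hp : pvPred myId st s t = false := by
          simp only [pvPred, hself, Bool.true_and]
          exact hnm
        simp [hp]

theorem count_similar_tickets_changed : Claim_changed_count_similar_tickets := by
  unfold Claim_changed_count_similar_tickets; decide

theorem count_similar_tickets_tight : Claim_exact_count_similar_tickets := by
  intro ticket all_tickets limit _ hd
  simp only [D_count_similar_tickets] at hd
  obtain ⟨hl, hfst⟩ := hd
  simp only [List.any_cons, List.any_nil, Bool.or_false, lookup_eq_pvGet, getD_fold, key_eq] at hfst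
  unfold count_similar_tickets
  rw [alt_eq]
  set st := pvGetD ticket "service_type" "" with hst
  set s := pvGetD ticket "service" "" with hs
  set myId := pvGet ticket "ticket_id" with hmy
  cases hfind : all_tickets.find? (fun t => pvGet t "ticket_id" != myId) with
  | none => rw [hfind] at hfst; exact absurd hfst (by simp)
  | some t =>
    rw [hfind] at hfst
    simp only [Option.any_some] at hfst
    have h0 : ¬ (st = "" ∧ s = "") := by
      rcases Bool.or_eq_true .. |>.mp hfst with h | h <;>
        (have h' := (Bool.and_eq_true ..).mp h; intro hc; simp [hc.1, hc.2] at h')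
    simp only [h0, if_false]
    rw [countLoopA_nonpos myId st s limit all_tickets hl]
    have hpos : ((all_tickets.countP (pvPred myId st s) : Nat) : Int) ≥ 0 := by positivity
    have hB : max 0 (min ((all_tickets.countP (pvPred myId st s) : Nat) : Int) limit) = 0 := by
      omega
    rw [hB, hfind]
    have hself : (pvGet t "ticket_id" != myId) = true := by
      have := List.find?_some hfind; simpa using this
    have hp : pvPred myId st s t = true := by
      simp only [pvPred, hself, Bool.true_and]
      exact hfst
    simp [hp]
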